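-- pv_equiv track=rewrite | github.com/stablephisher/pAIr-764 | backend/scoring/sustainability.py | _sdg_alignment
-- ===== SOURCE A (Python) =====
-- from typing import Any, Dict, List, Optional
--
-- def _sdg_alignment(profile: Optional[Dict] = None) -> List[str]:
--     """Map platform impact to UN Sustainable Development Goals."""
--     sdgs = [
--         "SDG 8: Decent Work & Economic Growth — MSME empowerment",
--         "SDG 9: Industry, Innovation & Infrastructure — AI-driven compliance",
--         "SDG 12: Responsible Consumption — Paperless operations",
--         "SDG 13: Climate Action — CO₂ reduction through digitization",
--     ]
--     if profile:
--         sector = profile.get("sector", "").lower()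
--         if any(w in sector for w in ["food", "agri", "farm"]):
--             sdgs.append("SDG 2: Zero Hunger — Agricultural MSME support")
--         owner = profile.get("owner_category", "").lower()
--         if any(w in owner for w in ["women", "woman", "female"]):
--             sdgs.append("SDG 5: Gender Equality — Women entrepreneurship")
--         if any(w in owner for w in ["sc", "st", "minority", "obc"]):
--             sdgs.append("SDG 10: Reduced Inequalities — Inclusive growth")
--     return sdgs
-- ===== SOURCE B (Python) =====
-- from typing import Any, Dict, List, Optional
--
-- _BASE_SDGS = [
--     "SDG 8: Decent Work & Economic Growth — MSME empowerment",
--     "SDG 9: Industry, Innovation & Infrastructure — AI-driven compliance",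
--     "SDG 12: Responsible Consumption — Paperless operations",
--     "SDG 13: Climate Action — CO₂ reduction through digitization",
-- ]
--
-- # Flat keyword -> SDG table (field the keyword is searched in, keyword, SDG string).
-- _KW_SDG = [
--     ("sector", "food", "SDG 2: Zero Hunger — Agricultural MSME support"),
--     ("sector", "agri", "SDG 2: Zero Hunger — Agricultural MSME support"),
--     ("sector", "farm", "SDG 2: Zero Hunger — Agricultural MSME support"),
--     ("owner_category", "women", "SDG 5: Gender Equality — Women entrepreneurship"),
--     ("owner_category", "woman", "SDG 5: Gender Equality — Women entrepreneurship"),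
--     ("owner_category", "female", "SDG 5: Gender Equality — Women entrepreneurship"),
--     ("owner_category", "sc", "SDG 10: Reduced Inequalities — Inclusive growth"),
--     ("owner_category", "st", "SDG 10: Reduced Inequalities — Inclusive growth"),
--     ("owner_category", "minority", "SDG 10: Reduced Inequalities — Inclusive growth"),
--     ("owner_category", "obc", "SDG 10: Reduced Inequalities — Inclusive growth"),
-- ]
--
-- def _sdg_alignment(profile: Optional[Dict] = None) -> List[str]:
--     """Map platform impact to UN Sustainable Development Goals."""
--     if not profile:
--         return list(_BASE_SDGS)
--     text = {
--         "sector": profile.get("sector", "").lower(),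
--         "owner_category": profile.get("owner_category", "").lower(),
--     }
--     hits = [sdg for field, kw, sdg in _KW_SDG if kw in text[field]]
--     return _BASE_SDGS + list(dict.fromkeys(hits))
-- ===== Notes on version B (the rewrite author's own statement) =====
-- stated objective: alternative
-- what changed: Replaces the per-rule any()-branches-and-append with a flat keyword->SDG lookup table scanned in one comprehension, followed by an ordered first-occurrence dedup (dict.fromkeys) of the matched SDG strings.
import Mathlib
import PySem

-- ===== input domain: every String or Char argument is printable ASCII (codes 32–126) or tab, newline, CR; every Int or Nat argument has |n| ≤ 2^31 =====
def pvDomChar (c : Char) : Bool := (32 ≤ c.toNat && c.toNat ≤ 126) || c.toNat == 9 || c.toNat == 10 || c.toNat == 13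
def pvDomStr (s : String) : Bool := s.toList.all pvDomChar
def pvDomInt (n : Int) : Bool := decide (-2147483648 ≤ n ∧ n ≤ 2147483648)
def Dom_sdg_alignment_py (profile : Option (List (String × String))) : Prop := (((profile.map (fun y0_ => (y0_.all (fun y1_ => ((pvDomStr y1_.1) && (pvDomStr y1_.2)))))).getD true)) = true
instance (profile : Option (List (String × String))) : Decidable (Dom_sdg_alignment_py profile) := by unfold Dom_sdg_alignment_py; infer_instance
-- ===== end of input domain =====

-- B replaces A's inline any()-branches-and-append by a flat keyword->SDG table scan plus an ordered first-occurrence dedup (dict.fromkeys); alternative decomposition, same cost.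


-- ===== PORT A =====
def sdg_alignment_py (profile : Option (List (String × String))) : List String :=
  let sdgs : List String := [
    "SDG 8: Decent Work & Economic Growth — MSME empowerment",
    "SDG 9: Industry, Innovation & Infrastructure — AI-driven compliance",
    "SDG 12: Responsible Consumption — Paperless operations",
    "SDG 13: Climate Action — CO₂ reduction through digitization"]
  match profile with
  | none => sdgs
  | some d =>
    if d = [] then sdgs
    else
      let sector := PySem.Str.lower (PySem.Dict.getD (PySem.Dict.mk d) "sector" "")
      let sdgs := if ["food", "agri", "farm"].any (fun w => PySem.Str.isIn w sector)
        then sdgs ++ ["SDG 2: Zero Hunger — Agricultural MSME support"] else sdgs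
      let owner := PySem.Str.lower (PySem.Dict.getD (PySem.Dict.mk d) "owner_category" "")
      let sdgs := if ["women", "woman", "female"].any (fun w => PySem.Str.isIn w owner)
        then sdgs ++ ["SDG 5: Gender Equality — Women entrepreneurship"] else sdgs
      let sdgs := if ["sc", "st", "minority", "obc"].any (fun w => PySem.Str.isIn w owner)
        then sdgs ++ ["SDG 10: Reduced Inequalities — Inclusive growth"] else sdgs
      sdgs

-- ===== PORT B =====
def pvBaseSdgs : List String := [
  "SDG 8: Decent Work & Economic Growth — MSME empowerment",
  "SDG 9: Industry, Innovation & Infrastructure — AI-driven compliance",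
  "SDG 12: Responsible Consumption — Paperless operations",
  "SDG 13: Climate Action — CO₂ reduction through digitization"]

-- flat (field, keyword, SDG) table
def pvKwSdg : List (String × String × String) := [
  ("sector", "food", "SDG 2: Zero Hunger — Agricultural MSME support"),
  ("sector", "agri", "SDG 2: Zero Hunger — Agricultural MSME support"),
  ("sector", "farm", "SDG 2: Zero Hunger — Agricultural MSME support"),
  ("owner_category", "women", "SDG 5: Gender Equality — Women entrepreneurship"),
  ("owner_category", "woman", "SDG 5: Gender Equality — Women entrepreneurship"),
  ("owner_category", "female", "SDG 5: Gender Equality — Women entrepreneurship"),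
  ("owner_category", "sc", "SDG 10: Reduced Inequalities — Inclusive growth"),
  ("owner_category", "st", "SDG 10: Reduced Inequalities — Inclusive growth"),
  ("owner_category", "minority", "SDG 10: Reduced Inequalities — Inclusive growth"),
  ("owner_category", "obc", "SDG 10: Reduced Inequalities — Inclusive growth")]

def sdg_alignment_py_alt (profile : Option (List (String × String))) : List String :=
  match profile with
  | none => pvBaseSdgs
  | some d =>
    if d = [] then pvBaseSdgs
    else
      -- text = {"sector": ..., "owner_category": ...}
      let text := PySem.Dict.mk [
        ("sector", PySem.Str.lower (PySem.Dict.getD (PySem.Dict.mk d) "sector" "")),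
        ("owner_category", PySem.Str.lower (PySem.Dict.getD (PySem.Dict.mk d) "owner_category" ""))]
      -- hits = [sdg for field, kw, sdg in _KW_SDG if kw in text[field]]
      let hits := (pvKwSdg.filter
        (fun r => PySem.Str.isIn r.2.1 (PySem.Dict.getD text r.1 ""))).map (fun r => r.2.2)
      -- dict.fromkeys(hits) as ordered dedup
      pvBaseSdgs ++ PySem.List.dedup hits

-- ===== PRECONDITION & SPEC =====
def Spec_sdg_alignment_py (profile : Option (List (String × String))) (out : List String) : Prop := out = sdg_alignment_py_alt profile
instance (profile : Option (List (String × String))) (out : List String) : Decidable (Spec_sdg_alignment_py profile out) := by unfold Spec_sdg_alignment_py; infer_instance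

-- ===== CLAIM (what is proved, stated in full; the proofs are below) =====
def Claim_equal_sdg_alignment_py : Prop := ∀ (profile : Option (List (String × String))), Dom_sdg_alignment_py profile → Spec_sdg_alignment_py profile (sdg_alignment_py profile)

-- ===== LEMMAS AND PROOFS =====

-- foldl of PySem.Set.add over a list whose elements are all x: a no-op when x is already in acc
theorem pvFoldlAddStable (acc : List String) (x : String) (hx : x ∈ acc)
    (l : List String) (h : ∀ a ∈ l, a = x) :
    List.foldl PySem.Set.add acc l = acc := by
  induction l with
  | nil => rfl
  | cons a t ih =>
    have ha : a = x := h a (List.mem_cons_self ..)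
    subst ha
    have : PySem.Set.add acc a = acc := by simp [PySem.Set.add, hx]
    rw [List.foldl_cons, this]
    exact ih (fun b hb => h b (List.mem_cons_of_mem _ hb))

-- foldl of PySem.Set.add over an all-x list: one conditional insertion of x
theorem pvFoldlAddConst (x : String) (l acc : List String) (h : ∀ a ∈ l, a = x) :
    List.foldl PySem.Set.add acc l = if l.isEmpty then acc else PySem.Set.add acc x := by
  cases l with
  | nil => rfl
  | cons a t =>
    have ha : a = x := h a (List.mem_cons_self ..)
    subst ha
    simp only [List.isEmpty_cons, List.foldl_cons]
    rw [if_neg (by simp)]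
    exact pvFoldlAddStable _ a (by simp [PySem.Set.add]; split <;> simp_all) t
      (fun b hb => h b (List.mem_cons_of_mem _ hb))

-- core identity between A's if-chain and B's filter+dedup, for the two lowered field values s, o
theorem pvMain (s o : String) :
    (let sdgs := pvBaseSdgs
     let sdgs := if ["food", "agri", "farm"].any (fun w => PySem.Str.isIn w s)
       then sdgs ++ ["SDG 2: Zero Hunger — Agricultural MSME support"] else sdgs
     let sdgs := if ["women", "woman", "female"].any (fun w => PySem.Str.isIn w o)
       then sdgs ++ ["SDG 5: Gender Equality — Women entrepreneurship"] else sdgs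
     let sdgs := if ["sc", "st", "minority", "obc"].any (fun w => PySem.Str.isIn w o)
       then sdgs ++ ["SDG 10: Reduced Inequalities — Inclusive growth"] else sdgs
     sdgs) =
    (let text := PySem.Dict.mk [("sector", s), ("owner_category", o)]
     let hits := (pvKwSdg.filter
       (fun r => PySem.Str.isIn r.2.1 (PySem.Dict.getD text r.1 ""))).map (fun r => r.2.2)
     pvBaseSdgs ++ PySem.List.dedup hits) := by
  show _ = pvBaseSdgs ++ PySem.List.dedup _
  rw [show pvKwSdg =
      ([("sector", "food", "SDG 2: Zero Hunger — Agricultural MSME support"),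
        ("sector", "agri", "SDG 2: Zero Hunger — Agricultural MSME support"),
        ("sector", "farm", "SDG 2: Zero Hunger — Agricultural MSME support")] ++
       [("owner_category", "women", "SDG 5: Gender Equality — Women entrepreneurship"),
        ("owner_category", "woman", "SDG 5: Gender Equality — Women entrepreneurship"),
        ("owner_category", "female", "SDG 5: Gender Equality — Women entrepreneurship")] ++
       [("owner_category", "sc", "SDG 10: Reduced Inequalities — Inclusive growth"),
        ("owner_category", "st", "SDG 10: Reduced Inequalities — Inclusive growth"),
        ("owner_category", "minority", "SDG 10: Reduced Inequalities — Inclusive growth"),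
        ("owner_category", "obc", "SDG 10: Reduced Inequalities — Inclusive growth")]) from rfl,
    List.filter_append, List.filter_append, List.map_append, List.map_append]
  simp only [PySem.List.dedup, PySem.Set.ofList, List.foldl_append]
  rw [pvFoldlAddConst "SDG 10: Reduced Inequalities — Inclusive growth" _ _
      (by intro a ha; simp only [List.mem_map, List.mem_filter] at ha
          obtain ⟨r, ⟨hr, -⟩, rfl⟩ := ha; fin_cases hr <;> rfl),
    pvFoldlAddConst "SDG 5: Gender Equality — Women entrepreneurship" _ _
      (by intro a ha; simp only [List.mem_map, List.mem_filter] at ha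
          obtain ⟨r, ⟨hr, -⟩, rfl⟩ := ha; fin_cases hr <;> rfl),
    pvFoldlAddConst "SDG 2: Zero Hunger — Agricultural MSME support" _ _
      (by intro a ha; simp only [List.mem_map, List.mem_filter] at ha
          obtain ⟨r, ⟨hr, -⟩, rfl⟩ := ha; fin_cases hr <;> rfl)]
  have e2 : (List.filter (fun r => PySem.Str.isIn r.2.1
        (PySem.Dict.getD (PySem.Dict.mk [("sector", s), ("owner_category", o)]) r.1 ""))
      [("sector", "food", "SDG 2: Zero Hunger — Agricultural MSME support"),
       ("sector", "agri", "SDG 2: Zero Hunger — Agricultural MSME support"),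
       ("sector", "farm", "SDG 2: Zero Hunger — Agricultural MSME support")]).isEmpty
      = !(["food", "agri", "farm"].any (fun w => PySem.Str.isIn w s)) := by
    cases h1 : PySem.Str.isIn "food" s <;> cases h2 : PySem.Str.isIn "agri" s <;>
      cases h3 : PySem.Str.isIn "farm" s <;>
      simp_all [
        show PySem.Dict.getD (PySem.Dict.mk [("sector", s), ("owner_category", o)]) "sector" "" = s from rfl]
  have e5 : (List.filter (fun r => PySem.Str.isIn r.2.1
        (PySem.Dict.getD (PySem.Dict.mk [("sector", s), ("owner_category", o)]) r.1 ""))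
      [("owner_category", "women", "SDG 5: Gender Equality — Women entrepreneurship"),
       ("owner_category", "woman", "SDG 5: Gender Equality — Women entrepreneurship"),
       ("owner_category", "female", "SDG 5: Gender Equality — Women entrepreneurship")]).isEmpty
      = !(["women", "woman", "female"].any (fun w => PySem.Str.isIn w o)) := by
    cases h1 : PySem.Str.isIn "women" o <;> cases h2 : PySem.Str.isIn "woman" o <;>
      cases h3 : PySem.Str.isIn "female" o <;>
      simp_all [
        show PySem.Dict.getD (PySem.Dict.mk [("sector", s), ("owner_category", o)]) "owner_category" "" = o from rfl]
  have e10 : (List.filter (fun r => PySem.Str.isIn r.2.1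
        (PySem.Dict.getD (PySem.Dict.mk [("sector", s), ("owner_category", o)]) r.1 ""))
      [("owner_category", "sc", "SDG 10: Reduced Inequalities — Inclusive growth"),
       ("owner_category", "st", "SDG 10: Reduced Inequalities — Inclusive growth"),
       ("owner_category", "minority", "SDG 10: Reduced Inequalities — Inclusive growth"),
       ("owner_category", "obc", "SDG 10: Reduced Inequalities — Inclusive growth")]).isEmpty
      = !(["sc", "st", "minority", "obc"].any (fun w => PySem.Str.isIn w o)) := by
    cases h1 : PySem.Str.isIn "sc" o <;> cases h2 : PySem.Str.isIn "st" o <;>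
      cases h3 : PySem.Str.isIn "minority" o <;> cases h4 : PySem.Str.isIn "obc" o <;>
      simp_all [
        show PySem.Dict.getD (PySem.Dict.mk [("sector", s), ("owner_category", o)]) "owner_category" "" = o from rfl]
  simp only [List.isEmpty_map, e2, e5, e10]
  cases hb1 : ["food", "agri", "farm"].any (fun w => PySem.Str.isIn w s) <;>
    cases hb2 : ["women", "woman", "female"].any (fun w => PySem.Str.isIn w o) <;>
    cases hb3 : ["sc", "st", "minority", "obc"].any (fun w => PySem.Str.isIn w o) <;>
    rfl

-- ===== VERDICT (by name: the statement is the Claim_ definition above) =====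
theorem sdg_alignment_py_spec : Claim_equal_sdg_alignment_py := by
  intro profile _
  unfold Spec_sdg_alignment_py sdg_alignment_py sdg_alignment_py_alt
  cases profile with
  | none => rfl
  | some d =>
    by_cases hd : d = []
    · simp [hd, pvBaseSdgs]
    · simp only [hd, if_false]
      generalize PySem.Str.lower (PySem.Dict.getD (PySem.Dict.mk d) "sector" "") = s
      generalize PySem.Str.lower (PySem.Dict.getD (PySem.Dict.mk d) "owner_category" "") = o
      exact pvMain s o
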